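-- pv_equiv track=rewrite | github.com/medicalphysics/OpenDXMCunmaintained-Python- | opendxmc/app/model.py | fixup
-- ===== SOURCE A (Python) =====
-- def fixup(instr):
--     instr = ''.join([b for b in instr.replace(',', ' ') if b in "1234567890. "])
--
--     fstr = ""
--     d_in_word = False
--     for s in instr:
--         if s == '.':
--             if not d_in_word:
--                 fstr += s
--             else:
--                 fstr += ' '
--             d_in_word = True
--         elif s == ' ':
--             d_in_word = False
--             fstr += ' '
--         else:
--             fstr += s
--
--
--     return fstr
-- ===== SOURCE B (Python) =====
-- def fixup(instr):
--     clean = ''.join([b for b in instr.replace(',', ' ') if b in "1234567890. "])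
--     # split into space-separated segments (preserving empties)
--     segs = []
--     cur = ''
--     for c in clean:
--         if c == ' ':
--             segs.append(cur)
--             cur = ''
--         else:
--             cur += c
--     segs.append(cur)
--     # per segment: keep everything up to and including the first dot,
--     # turn every later dot into a space (find == -1 makes this the identity)
--     fixed = []
--     for seg in segs:
--         k = seg.find('.')
--         fixed.append(seg[:k + 1] + ''.join(' ' if c == '.' else c for c in seg[k + 1:]))
--     return ' '.join(fixed)
-- ===== Notes on version B (the rewrite author's own statement) =====
-- stated objective: alternative
-- what changed: A's single fused scan with a d_in_word flag is replaced by a stateless split/map/join pipeline: split the cleaned string on spaces (keeping empty segments), repair each segment independently by keeping everything up to the first dot and spacing out later dots, then rejoin with single spaces.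
import Mathlib
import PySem

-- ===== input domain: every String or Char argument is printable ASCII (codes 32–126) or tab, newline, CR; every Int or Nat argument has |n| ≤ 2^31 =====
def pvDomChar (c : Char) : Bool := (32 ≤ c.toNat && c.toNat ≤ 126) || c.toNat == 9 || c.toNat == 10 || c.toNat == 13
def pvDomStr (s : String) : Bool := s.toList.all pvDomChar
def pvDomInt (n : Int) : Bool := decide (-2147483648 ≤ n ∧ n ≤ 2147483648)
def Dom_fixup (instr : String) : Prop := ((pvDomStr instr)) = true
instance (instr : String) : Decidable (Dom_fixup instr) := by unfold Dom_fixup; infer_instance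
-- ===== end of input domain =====

-- B replaces A's fused stateful scan by a stateless split-on-space / repair-each-segment / join pipeline (objective: alternative, same cost).

-- ===== PORT A =====
-- instr = ''.join([b for b in instr.replace(',', ' ') if b in "1234567890. "])  (shared first line of A and B)
def pvClean (instr : String) : List Char :=
  (PySem.Chars.replace instr.toList [','] [' ']).filter
    (fun b => PySem.Chars.isIn [b] "1234567890. ".toList)

-- fstr = ""; d_in_word = False; for s in …: (the three branches, in order)
def pvLoopA (l : List Char) : List Char × Bool :=
  l.foldl
    (fun (acc : List Char × Bool) s =>
      if s = '.' then
        (if acc.2 = false then (acc.1 ++ ['.'], true) else (acc.1 ++ [' '], true))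
      else if s = ' ' then (acc.1 ++ [' '], false)
      else (acc.1 ++ [s], acc.2))
    ([], false)

def fixup (instr : String) : String :=
  String.mk (pvLoopA (pvClean instr)).1

-- ===== PORT B =====
-- segs = []; cur = ''; for c in clean: if c == ' ': segs.append(cur); cur = '' else: cur += c
def pvSplitFold (l : List Char) : List (List Char) × List Char :=
  l.foldl
    (fun (acc : List (List Char) × List Char) c =>
      if c = ' ' then (acc.1 ++ [acc.2], []) else (acc.1, acc.2 ++ [c]))
    ([], [])

-- k = seg.find('.'); seg[:k+1] + ''.join(' ' if c == '.' else c for c in seg[k+1:])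
def pvFixSeg (seg : List Char) : List Char :=
  PySem.List.slice seg none (some (PySem.Chars.find seg ['.'] + 1)) ++
    (PySem.List.slice seg (some (PySem.Chars.find seg ['.'] + 1)) none).map
      (fun c => if c = '.' then ' ' else c)

def fixup_alt (instr : String) : String :=
  -- segs.append(cur) after the loop; fixed = [… for seg in segs]; return ' '.join(fixed)
  String.mk (PySem.Chars.join [' ']
    (((pvSplitFold (pvClean instr)).1 ++ [(pvSplitFold (pvClean instr)).2]).map pvFixSeg))

-- ===== PRECONDITION & SPEC =====
def Spec_fixup (instr : String) (out : String) : Prop := out = fixup_alt instr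
instance (instr : String) (out : String) : Decidable (Spec_fixup instr out) := by unfold Spec_fixup; infer_instance

-- ===== CLAIM (what is proved, stated in full; the proofs are below) =====
def Claim_equal_fixup : Prop := ∀ (instr : String), Dom_fixup instr → Spec_fixup instr (fixup instr)

-- ===== LEMMAS AND PROOFS =====

-- dot → space
def pvSub (c : Char) : Char := if c = '.' then ' ' else c

-- A's loop, as a structural recursion (flag d).
def pvProc (d : Bool) : List Char → List Char
  | [] => []
  | c :: r =>
    if c = '.' then (if d then ' ' else '.') :: pvProc true r
    else if c = ' ' then ' ' :: pvProc false r
    else c :: pvProc d r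

-- B's split, as a structural recursion: (first segment, remaining segments).
def pvSplit : List Char → List Char × List (List Char)
  | [] => ([], [])
  | c :: r =>
    if c = ' ' then ([], (pvSplit r).1 :: (pvSplit r).2)
    else (c :: (pvSplit r).1, (pvSplit r).2)

-- tail of the joined result: ' ' before each further fixed segment
def pvJrest : List (List Char) → List Char
  | [] => []
  | t :: ts => ' ' :: (pvFixSeg t ++ pvJrest ts)

def pvFixSegD (d : Bool) (s : List Char) : List Char :=
  if d then s.map pvSub else pvFixSeg s

lemma pvA_loop (l : List Char) : ∀ (acc : List Char) (d : Bool),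
    (l.foldl
      (fun (acc : List Char × Bool) s =>
        if s = '.' then
          (if acc.2 = false then (acc.1 ++ ['.'], true) else (acc.1 ++ [' '], true))
        else if s = ' ' then (acc.1 ++ [' '], false)
        else (acc.1 ++ [s], acc.2))
      (acc, d)).1 = acc ++ pvProc d l := by
  induction l with
  | nil => intro acc d; simp [pvProc]
  | cons c r ih =>
    intro acc d
    by_cases hc : c = '.'
    · cases d <;> simp [hc, pvProc, ih]
    · by_cases hs : c = ' ' <;> simp [hc, hs, pvProc, ih]

lemma pvB_loop (l : List Char) : ∀ (segs : List (List Char)) (cur : List Char),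
    (l.foldl
      (fun (acc : List (List Char) × List Char) c =>
        if c = ' ' then (acc.1 ++ [acc.2], []) else (acc.1, acc.2 ++ [c]))
      (segs, cur)).1 ++
    [(l.foldl
      (fun (acc : List (List Char) × List Char) c =>
        if c = ' ' then (acc.1 ++ [acc.2], []) else (acc.1, acc.2 ++ [c]))
      (segs, cur)).2]
    = segs ++ (cur ++ (pvSplit l).1) :: (pvSplit l).2 := by
  induction l with
  | nil => intro segs cur; simp [pvSplit]
  | cons c r ih =>
    intro segs cur
    by_cases hs : c = ' ' <;> simp [hs, pvSplit, ih]

-- find.go on the single-character pattern, shifted start index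
lemma pvGoShift (s : List Char) : ∀ k : Nat,
    PySem.Chars.find.go ['.'] s k =
      if PySem.Chars.find.go ['.'] s 0 = -1 then -1
      else PySem.Chars.find.go ['.'] s 0 + k := by
  induction s with
  | nil => intro k; simp [PySem.Chars.find.go]
  | cons c r ih =>
    intro k
    by_cases hc : c = '.'
    · simp [PySem.Chars.find.go, List.isPrefixOf, hc]
    · have hp : List.isPrefixOf ['.'] (c :: r) = false := by
        simp [List.isPrefixOf, Ne.symm hc]
      have e : ∀ j : Nat, PySem.Chars.find.go ['.'] (c :: r) j =
          PySem.Chars.find.go ['.'] r (j + 1) := by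
        intro j; rw [PySem.Chars.find.go]; simp [hp]
      rw [e k, e 0, ih (k + 1), ih 1]
      have h0 : -1 ≤ PySem.Chars.find.go ['.'] r 0 := by
        have := PySem.Chars.neg_one_le_find r ['.']
        simpa [PySem.Chars.find] using this
      by_cases h : PySem.Chars.find.go ['.'] r 0 = -1
      · simp [h]
      · have hne : ¬ (PySem.Chars.find.go ['.'] r 0 + 1 = -1) := by omega
        simp [h, hne]; ring

lemma pvFind_cons_dot (s : List Char) : PySem.Chars.find ('.' :: s) ['.'] = 0 := by
  simp [PySem.Chars.find, PySem.Chars.find.go, List.isPrefixOf]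

lemma pvFind_cons_ne (c : Char) (s : List Char) (hc : c ≠ '.') :
    PySem.Chars.find (c :: s) ['.'] =
      if PySem.Chars.find s ['.'] = -1 then -1 else PySem.Chars.find s ['.'] + 1 := by
  have hp : List.isPrefixOf ['.'] (c :: s) = false := by
    simp [List.isPrefixOf, Ne.symm hc]
  simp only [PySem.Chars.find]
  rw [PySem.Chars.find.go]; simp [hp]
  exact pvGoShift s 1

lemma pvFixSeg_nil : pvFixSeg [] = [] := by decide

lemma pvFixSeg_no_dot (s : List Char) (h : PySem.Chars.find s ['.'] = -1) :
    pvFixSeg s = s.map pvSub := by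
  unfold pvFixSeg
  rw [h]
  norm_num
  rw [PySem.List.slice_to s (by omega : (0:Int) ≤ 0)]
  simp [pvSub]

lemma pvFixSeg_cons_dot (s : List Char) : pvFixSeg ('.' :: s) = '.' :: s.map pvSub := by
  unfold pvFixSeg
  rw [pvFind_cons_dot]
  norm_num
  rw [PySem.List.slice_to _ (by omega : (0:Int) ≤ 1),
      PySem.List.slice_from _ (by omega : (0:Int) ≤ 1)]
  simp [pvSub]

lemma pvFixSeg_cons_ne (c : Char) (s : List Char) (hc : c ≠ '.') :
    pvFixSeg (c :: s) = c :: pvFixSeg s := by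
  have hle : -1 ≤ PySem.Chars.find s ['.'] := PySem.Chars.neg_one_le_find s ['.']
  by_cases h : PySem.Chars.find s ['.'] = -1
  · rw [pvFixSeg_no_dot _ (by rw [pvFind_cons_ne c s hc]; simp [h]), pvFixSeg_no_dot _ h]
    simp [pvSub, hc]
  · have h0 : 0 ≤ PySem.Chars.find s ['.'] := by omega
    have hcons : PySem.Chars.find (c :: s) ['.'] = PySem.Chars.find s ['.'] + 1 := by
      rw [pvFind_cons_ne c s hc]; simp [h]
    unfold pvFixSeg
    rw [hcons,
        PySem.List.slice_to _ (by omega : (0:Int) ≤ PySem.Chars.find s ['.'] + 1 + 1),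
        PySem.List.slice_from _ (by omega : (0:Int) ≤ PySem.Chars.find s ['.'] + 1 + 1),
        PySem.List.slice_to _ (by omega : (0:Int) ≤ PySem.Chars.find s ['.'] + 1),
        PySem.List.slice_from _ (by omega : (0:Int) ≤ PySem.Chars.find s ['.'] + 1)]
    have ht : (PySem.Chars.find s ['.'] + 1 + 1).toNat
        = (PySem.Chars.find s ['.'] + 1).toNat + 1 := by omega
    simp [ht]

-- main: A's flagged scan = fix first segment with flag d, then ' '-join the fixed rest
lemma pvMain (l : List Char) : ∀ d : Bool,
    pvProc d l = pvFixSegD d (pvSplit l).1 ++ pvJrest (pvSplit l).2 := by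
  induction l with
  | nil => intro d; cases d <;> simp [pvProc, pvSplit, pvJrest, pvFixSegD, pvFixSeg_nil]
  | cons c r ih =>
    intro d
    by_cases hc : c = '.'
    · subst hc
      cases d <;>
        simp [pvProc, pvSplit, pvFixSegD, pvFixSeg_cons_dot, pvSub, ih true]
    · by_cases hs : c = ' '
      · subst hs
        simp [pvProc, pvSplit, hc, pvJrest, pvFixSegD, ih false]
        cases d <;> simp [pvFixSeg_nil]
      · cases d <;>
          simp [pvProc, pvSplit, hc, hs, pvFixSegD, pvFixSeg_cons_ne c _ hc, pvSub, ih]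

lemma pvJoin_map (s : List Char) (ss : List (List Char)) :
    PySem.Chars.join [' '] ((s :: ss).map pvFixSeg) = pvFixSeg s ++ pvJrest ss := by
  induction ss generalizing s with
  | nil => simp [pvJrest, PySem.Chars.join_singleton]
  | cons t ts ih =>
    simp only [List.map_cons, pvJrest] at *
    rw [PySem.Chars.join_cons_cons, ih]
    simp

-- ===== VERDICT (by name: the statement is the Claim_ definition above) =====
theorem fixup_spec : Claim_equal_fixup := by
  intro instr _
  unfold Spec_fixup fixup fixup_alt pvLoopA pvSplitFold
  rw [pvA_loop (pvClean instr) [] false, pvB_loop (pvClean instr) [] []]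
  rw [pvMain (pvClean instr) false]
  simp only [List.nil_append]
  rw [pvJoin_map ((pvSplit (pvClean instr)).1) ((pvSplit (pvClean instr)).2)]
  simp [pvFixSegD]
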